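-- pv_equiv track=rewrite | github.com/JuanGonzalezCaminero/Seam_Carving | ImageUtility.py | getGreyscale
-- ===== SOURCE A (Python) =====
-- def getSeparateChannels(imageRGB):
--     imageR = []
--     imageG = []
--     imageB = []
--
--     for i in range(len(imageRGB)):
--         imageR.append([])
--         imageG.append([])
--         imageB.append([])
--         for j in range(len(imageRGB[0])):
--             imageR[i].append(imageRGB[i][j][0])
--             imageG[i].append(imageRGB[i][j][1])
--             imageB[i].append(imageRGB[i][j][2])
--
--     return (imageR, imageG, imageB)
--
-- def getGreyscale(imageRGB):
--     greyscaleImage = []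
--     (imageR, imageG, imageB) = getSeparateChannels(imageRGB)
--     # Combining the channels into a single greyscale image
--     for i in range(len(imageR)):
--         greyscaleImage.append([])
--         for j in range(len(imageR[0])):
--             greyscaleImage[i].append(imageR[i][j] // 3 + imageG[i][j] // 3 + imageB[i][j] // 3)
--     return greyscaleImage
-- ===== SOURCE B (Python) =====
-- def getGreyscale(imageRGB):
--     return [[imageRGB[i][j][0] // 3 + imageRGB[i][j][1] // 3 + imageRGB[i][j][2] // 3
--              for j in range(len(imageRGB[0]))]
--             for i in range(len(imageRGB))]
-- ===== Notes on version B (the rewrite author's own statement) =====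
-- stated objective: simpler
-- what changed: B drops A's three-phase pipeline (split the image into three full R/G/B channel matrices, then recombine them by index) and computes each greyscale pixel in one direct nested comprehension over the image, never materialising the channel matrices.
import Mathlib
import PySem

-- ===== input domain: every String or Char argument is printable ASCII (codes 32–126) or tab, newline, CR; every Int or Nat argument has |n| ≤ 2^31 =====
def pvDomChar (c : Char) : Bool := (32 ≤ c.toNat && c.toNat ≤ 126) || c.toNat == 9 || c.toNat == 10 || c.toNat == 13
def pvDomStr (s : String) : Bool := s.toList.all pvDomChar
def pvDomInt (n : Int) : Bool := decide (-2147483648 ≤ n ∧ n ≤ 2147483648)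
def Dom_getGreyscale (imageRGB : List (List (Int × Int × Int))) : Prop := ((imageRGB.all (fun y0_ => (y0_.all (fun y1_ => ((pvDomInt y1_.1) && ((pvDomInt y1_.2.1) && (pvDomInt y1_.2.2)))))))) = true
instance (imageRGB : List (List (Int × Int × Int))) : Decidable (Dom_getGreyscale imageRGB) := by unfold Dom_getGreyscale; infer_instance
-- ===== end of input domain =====

-- B replaces A's three-phase pipeline (splitting into R/G/B channel matrices, then
-- recombining by index) with one direct nested comprehension over the image; simpler, same cost class.

-- ===== PORT A =====
-- imageRGB[i][j] read by range indices; total form of xs[i] used only where Pre_ keeps it in range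
def pvPixA (imageRGB : List (List (Int × Int × Int))) (i j : Nat) : Int × Int × Int :=
  PySem.List.pyGetD (PySem.List.pyGetD imageRGB (i : Int) []) (j : Int) (0, 0, 0)

def getSeparateChannels (imageRGB : List (List (Int × Int × Int))) :
    List (List Int) × List (List Int) × List (List Int) :=
  (List.range imageRGB.length).foldl
    (fun st i =>
      let w := (PySem.List.pyGetD imageRGB 0 []).length
      let rows := (List.range w).foldl
        (fun (rs : List Int × List Int × List Int) j =>
          (rs.1 ++ [(pvPixA imageRGB i j).1],
           rs.2.1 ++ [(pvPixA imageRGB i j).2.1],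
           rs.2.2 ++ [(pvPixA imageRGB i j).2.2]))
        ([], [], [])
      (st.1 ++ [rows.1], st.2.1 ++ [rows.2.1], st.2.2 ++ [rows.2.2]))
    ([], [], [])

def getGreyscale (imageRGB : List (List (Int × Int × Int))) : List (List Int) :=
  let s := getSeparateChannels imageRGB
  let imageR := s.1
  let imageG := s.2.1
  let imageB := s.2.2
  (List.range imageR.length).foldl
    (fun acc (i : Nat) =>
      let w := (PySem.List.pyGetD imageR 0 []).length
      acc ++ [(List.range w).foldl
        (fun r (j : Nat) =>
          r ++ [PySem.Int.floordiv (PySem.List.pyGetD (PySem.List.pyGetD imageR (i : Int) []) (j : Int) 0) 3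
              + PySem.Int.floordiv (PySem.List.pyGetD (PySem.List.pyGetD imageG (i : Int) []) (j : Int) 0) 3
              + PySem.Int.floordiv (PySem.List.pyGetD (PySem.List.pyGetD imageB (i : Int) []) (j : Int) 0) 3])
        []])
    []

-- ===== PORT B =====
def getGreyscale_alt (imageRGB : List (List (Int × Int × Int))) : List (List Int) :=
  (List.range imageRGB.length).map (fun (i : Nat) =>
    (List.range (PySem.List.pyGetD imageRGB 0 []).length).map (fun (j : Nat) =>
      PySem.Int.floordiv (PySem.List.pyGetD (PySem.List.pyGetD imageRGB (i : Int) []) (j : Int) (0, 0, 0)).1 3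
      + PySem.Int.floordiv (PySem.List.pyGetD (PySem.List.pyGetD imageRGB (i : Int) []) (j : Int) (0, 0, 0)).2.1 3
      + PySem.Int.floordiv (PySem.List.pyGetD (PySem.List.pyGetD imageRGB (i : Int) []) (j : Int) (0, 0, 0)).2.2 3))

-- ===== PRECONDITION & SPEC =====
-- A (and B) raise IndexError exactly when some row is shorter than the first row;
-- Pre_ excludes those inputs and nothing else.
def Pre_getGreyscale (imageRGB : List (List (Int × Int × Int))) : Prop :=
  ∀ row ∈ imageRGB, (imageRGB.headD []).length ≤ row.length
instance (imageRGB : List (List (Int × Int × Int))) : Decidable (Pre_getGreyscale imageRGB) := by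
  unfold Pre_getGreyscale; infer_instance
def pvWitness_getGreyscale : (List (List (Int × Int × Int))) := [[(1, 2, 3)], [(4, 5, 6)]]

def Spec_getGreyscale (imageRGB : List (List (Int × Int × Int))) (out : List (List Int)) : Prop := out = getGreyscale_alt imageRGB
instance (imageRGB : List (List (Int × Int × Int))) (out : List (List Int)) : Decidable (Spec_getGreyscale imageRGB out) := by unfold Spec_getGreyscale; infer_instance

-- ===== CLAIM (what is proved, stated in full; the proofs are below) =====
def Claim_equal_getGreyscale : Prop := ∀ (imageRGB : List (List (Int × Int × Int))), Dom_getGreyscale imageRGB → Pre_getGreyscale imageRGB → Spec_getGreyscale imageRGB (getGreyscale imageRGB)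

-- ===== LEMMAS AND PROOFS =====

-- A's inner channel-building loop, characterised (triple-state fold = three maps)
theorem pv_inner_fold (img : List (List (Int × Int × Int))) (i : Nat) (l : List Nat)
    (a b c : List Int) :
    l.foldl (fun (rs : List Int × List Int × List Int) j =>
        (rs.1 ++ [(pvPixA img i j).1], rs.2.1 ++ [(pvPixA img i j).2.1],
         rs.2.2 ++ [(pvPixA img i j).2.2])) (a, b, c)
      = (a ++ l.map (fun j => (pvPixA img i j).1),
         b ++ l.map (fun j => (pvPixA img i j).2.1),
         c ++ l.map (fun j => (pvPixA img i j).2.2)) := by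
  induction l generalizing a b c with
  | nil => simp
  | cons x xs ih => simp [List.foldl_cons, ih]

-- A's outer channel loop, characterised
theorem pv_outer_fold (F G H : Nat → List Int) (l : List Nat) (a b c : List (List Int)) :
    l.foldl (fun (st : List (List Int) × List (List Int) × List (List Int)) i =>
        (st.1 ++ [F i], st.2.1 ++ [G i], st.2.2 ++ [H i])) (a, b, c)
      = (a ++ l.map F, b ++ l.map G, c ++ l.map H) := by
  induction l generalizing a b c with
  | nil => simp
  | cons x xs ih => simp [List.foldl_cons, ih]

theorem sep_eq (img : List (List (Int × Int × Int))) :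
    getSeparateChannels img =
      ((List.range img.length).map (fun i =>
          (List.range (PySem.List.pyGetD img 0 []).length).map (fun j => (pvPixA img i j).1)),
       (List.range img.length).map (fun i =>
          (List.range (PySem.List.pyGetD img 0 []).length).map (fun j => (pvPixA img i j).2.1)),
       (List.range img.length).map (fun i =>
          (List.range (PySem.List.pyGetD img 0 []).length).map (fun j => (pvPixA img i j).2.2))) := by
  unfold getSeparateChannels
  simp only [pv_inner_fold, List.nil_append, pv_outer_fold]

-- first element of each channel matrix has the width of the first input row
theorem pv_head_len (img : List (List (Int × Int × Int))) (rowF : Nat → List Int)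
    (hlen : ∀ i, i < img.length → (rowF i).length = (PySem.List.pyGetD img 0 []).length) :
    (PySem.List.pyGetD ((List.range img.length).map rowF) 0 []).length
      = (PySem.List.pyGetD img 0 []).length := by
  cases img with
  | nil => rfl
  | cons r0 rest =>
    rw [PySem.List.pyGetD_zero_cons]
    have h0 : (0 : Nat) < (r0 :: rest).length := by simp
    have hsplit : ((List.range (r0 :: rest).length).map rowF) = rowF 0 :: ((List.range rest.length).map (fun k => rowF (k+1))) := by
      simp [List.range_succ_eq_map, List.map_map, Function.comp]
    rw [hsplit, PySem.List.pyGetD_zero_cons]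
    have h := hlen 0 h0
    rw [PySem.List.pyGetD_zero_cons] at h
    exact h

def pvFd3 (x : Int) : Int := PySem.Int.floordiv x 3

-- A as one nested double map over index ranges
theorem A_eq_doubleMap (img : List (List (Int × Int × Int))) :
    getGreyscale img = (List.range img.length).map (fun i =>
      (List.range (PySem.List.pyGetD img 0 []).length).map (fun j =>
        pvFd3 (pvPixA img i j).1 + pvFd3 (pvPixA img i j).2.1 + pvFd3 (pvPixA img i j).2.2)) := by
  unfold getGreyscale
  rw [sep_eq]
  simp only [List.length_map, List.length_range]
  have hwlen : ∀ (f : (Int × Int × Int) → Int),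
      (PySem.List.pyGetD ((List.range img.length).map (fun i =>
        (List.range (PySem.List.pyGetD img 0 []).length).map (fun j => f (pvPixA img i j)))) 0 []).length
      = (PySem.List.pyGetD img 0 []).length := by
    intro f
    exact pv_head_len img _ (fun i _ => by simp)
  rw [hwlen (fun p => p.1), PySem.List.foldl_append_singleton_eq_map, List.nil_append]
  apply List.map_congr_left
  intro i hi
  have hi' : i < img.length := List.mem_range.mp hi
  rw [PySem.List.foldl_append_singleton_eq_map, List.nil_append]
  apply List.map_congr_left
  intro j hj
  have hj' : j < (PySem.List.pyGetD img 0 []).length := List.mem_range.mp hj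
  have hchan : ∀ (f : (Int × Int × Int) → Int),
      PySem.List.pyGetD (PySem.List.pyGetD ((List.range img.length).map (fun i' =>
        (List.range (PySem.List.pyGetD img 0 []).length).map (fun j' => f (pvPixA img i' j')))) (i : Int) []) (j : Int) 0
      = f (pvPixA img i j) := by
    intro f
    simp only [PySem.List.pyGetD_natCast]
    rw [PySem.List.getD_map_range _ _ _ _ hi']
    rw [List.getD_eq_getElem?_getD, List.getElem?_map, List.getElem?_range hj']
    simp
  rw [hchan (fun p => p.1), hchan (fun p => p.2.1), hchan (fun p => p.2.2)]
  rfl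

-- ===== VERDICT (by name: the statement is the Claim_ definition above) =====
theorem getGreyscale_spec : Claim_equal_getGreyscale := by
  intro imageRGB _ _
  show getGreyscale imageRGB = getGreyscale_alt imageRGB
  rw [A_eq_doubleMap]
  unfold getGreyscale_alt pvFd3 pvPixA
  rfl
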